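-- pv_equiv track=rewrite | github.com/nadiahpk/coauthorship-game | examples/used_to_build/eg_9_forbidden_transitions.py | fsactions_coactions_2_actions
-- ===== SOURCE A (Python) =====
-- def fsactions_coactions_2_actions(fs_actionV, co_actionsV):
--     # Convert two tuples --- (1) first-author actions, and (2) co-author
--     # actions --- into an actions matrix (tuple of tuples)
--     #
--     #
--     # Inputs:
--     # ---
--     #
--     # fs_actionV, binary tuple of length n
--     #   First-author actions. Each element i indicates whether player i
--     #   first-authored (1) or not (0).
--     #
--     # co_actionsV, (n-1) x (n-1) binary tuple of tuples
--     #   Co-author actions. Each row i corresponds to the first author, and each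
--     #   column corresponds to the co-author, however the col indexing skips the
--     #   co-author = first-author case.
--     #
--     #
--     # Outputs:
--     # ---
--     #
--     # actions, n x n binary tuple of tuples
--     #   Each element a_{i,j} is the action of potential author i with respect
--     #   to the paper first-authored by j
--     #
--     #
--     # Example:
--     # ---
--     #
--     # >>> fs_actionV = ('a', 'e', 'i')
--     # >>> co_actionsV = (('d', 'g'), ('b', 'h'), ('c', 'f'))
--     # >>> fsactions_coactions_2_actions(fs_actionV, co_actionsV)
--     # (('a', 'b', 'c'), ('d', 'e', 'f'), ('g', 'h', 'i'))
--
--     n = len(fs_actionV)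
--     assert len(co_actionsV) == n
--     assert len(co_actionsV[0]) == (n - 1)
--
--     # remember the co_actionsV are columns of the actions matrix
--     # and the focal index is skipped
--
--     # actions matrix transposed
--     actions_transposed = [
--         co_actions[:fs_idx] + (fs_action,) + co_actions[fs_idx:]
--         for fs_idx, (fs_action, co_actions) in enumerate(zip(fs_actionV, co_actionsV))
--     ]
--
--     # transpose to get original
--     actions = tuple(zip(*actions_transposed))
--
--     return actions
-- ===== SOURCE B (Python) =====
-- def fsactions_coactions_2_actions(fs_actionV, co_actionsV):
--     # Build the actions matrix element-by-element instead of A's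
--     # slice-insert-then-transpose: a[i][j] is fs_actionV[i] on the diagonal,
--     # and otherwise column j is co_actionsV[j] with the diagonal slot skipped.
--     n = len(fs_actionV)
--     assert len(co_actionsV) == n
--     assert len(co_actionsV[0]) == (n - 1)
--     return tuple(
--         tuple(
--             fs_actionV[i] if i == j
--             else co_actionsV[j][i] if i < j
--             else co_actionsV[j][i - 1]
--             for j in range(n)
--         )
--         for i in range(n)
--     )
-- ===== Notes on version B (the rewrite author's own statement) =====
-- stated objective: idiomatic
-- what changed: Replaces A's slice-concatenation of each column followed by a zip(*) transpose with a direct double loop that computes each entry a[i][j] from an index comparison (diagonal -> fs_actionV[i], else co_actionsV[j][i] or co_actionsV[j][i-1]).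
-- outside the precondition, e.g. on fsactions_coactions_2_actions((1, 2), ((3,), ())): A returns ((1, 2),), B raises IndexError; on fsactions_coactions_2_actions((1, 2, 3), ((4, 5), (6,), (7, 8))): A returns ((1, 6, 7), (4, 2, 8)), B raises IndexError
import Mathlib
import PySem

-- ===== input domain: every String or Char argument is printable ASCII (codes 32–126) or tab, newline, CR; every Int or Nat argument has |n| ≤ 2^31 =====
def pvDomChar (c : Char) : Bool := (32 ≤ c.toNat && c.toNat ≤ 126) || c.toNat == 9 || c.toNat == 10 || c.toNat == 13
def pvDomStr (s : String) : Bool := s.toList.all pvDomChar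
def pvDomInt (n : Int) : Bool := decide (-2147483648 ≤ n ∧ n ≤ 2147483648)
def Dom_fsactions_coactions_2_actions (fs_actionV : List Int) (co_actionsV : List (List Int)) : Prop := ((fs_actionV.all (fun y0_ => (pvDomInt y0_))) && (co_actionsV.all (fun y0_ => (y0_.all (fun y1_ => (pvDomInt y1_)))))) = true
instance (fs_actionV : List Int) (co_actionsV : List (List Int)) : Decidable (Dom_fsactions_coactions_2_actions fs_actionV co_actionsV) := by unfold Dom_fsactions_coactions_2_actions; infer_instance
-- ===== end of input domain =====

-- B builds the matrix element-by-element from an index comparison instead of A's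
-- slice-insert of each column followed by a zip(*) transpose (objective: idiomatic; same cost).

-- ===== PORT A =====
-- the comprehension 'co_actions[:fs_idx] + (fs_action,) + co_actions[fs_idx:]' over
-- enumerate(zip(fs_actionV, co_actionsV)); fs_idx ≥ 0, so the slices are take/drop (exact)
def pvBuildTransposed : Nat → List (Int × List Int) → List (List Int)
  | _, [] => []
  | i, (a, c) :: rest => (c.take i ++ [a] ++ c.drop i) :: pvBuildTransposed (i + 1) rest

-- tuple(zip(*rows)): transpose truncated to the shortest row (zip of no rows = []);
-- every index k read is < the minimum row length, so getD is exact
def pvZipStar (rows : List (List Int)) : List (List Int) :=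
  let m := ((rows.map List.length).min?).getD 0
  (List.range m).map (fun k => rows.map (fun r => r.getD k 0))

def fsactions_coactions_2_actions (fs_actionV : List Int) (co_actionsV : List (List Int)) : List (List Int) :=
  pvZipStar (pvBuildTransposed 0 (fs_actionV.zip co_actionsV))

-- ===== PORT B =====
-- indices i, j, i-1 are in range under Pre_, so getD is exact
def fsactions_coactions_2_actions_alt (fs_actionV : List Int) (co_actionsV : List (List Int)) : List (List Int) :=
  let n := fs_actionV.length
  (List.range n).map (fun i => (List.range n).map (fun j =>
    if i = j then fs_actionV.getD i 0
    else if i < j then (co_actionsV.getD j []).getD i 0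
    else (co_actionsV.getD j []).getD (i - 1) 0))

-- ===== PRECONDITION & SPEC =====
-- Pre_ excludes inputs where A raises (shape asserts; the co_actionsV[0] IndexError for empty
-- input) and, beyond that, ragged co_actionsV with a row shorter than n-1, where A's zip(*)
-- silently truncates the matrix — an accident of its implementation on which B's direct
-- indexing raises IndexError instead.
def Pre_fsactions_coactions_2_actions (fs_actionV : List Int) (co_actionsV : List (List Int)) : Prop :=
  fs_actionV ≠ [] ∧ co_actionsV.length = fs_actionV.length ∧
  (co_actionsV.getD 0 []).length = fs_actionV.length - 1 ∧
  ∀ r ∈ co_actionsV, fs_actionV.length - 1 ≤ r.length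
instance (fs_actionV : List Int) (co_actionsV : List (List Int)) : Decidable (Pre_fsactions_coactions_2_actions fs_actionV co_actionsV) := by unfold Pre_fsactions_coactions_2_actions; infer_instance

def pvWitness_fsactions_coactions_2_actions : List Int × List (List Int) := ([1, 0, 1], [[0, 1], [1, 0], [0, 0]])

def Spec_fsactions_coactions_2_actions (fs_actionV : List Int) (co_actionsV : List (List Int)) (out : List (List Int)) : Prop := out = fsactions_coactions_2_actions_alt fs_actionV co_actionsV
instance (fs_actionV : List Int) (co_actionsV : List (List Int)) (out : List (List Int)) : Decidable (Spec_fsactions_coactions_2_actions fs_actionV co_actionsV out) := by unfold Spec_fsactions_coactions_2_actions; infer_instance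

-- ===== CLAIM (what is proved, stated in full; the proofs are below) =====
def Claim_equal_fsactions_coactions_2_actions : Prop := ∀ (fs_actionV : List Int) (co_actionsV : List (List Int)), Dom_fsactions_coactions_2_actions fs_actionV co_actionsV → Pre_fsactions_coactions_2_actions fs_actionV co_actionsV → Spec_fsactions_coactions_2_actions fs_actionV co_actionsV (fsactions_coactions_2_actions fs_actionV co_actionsV)

-- ===== LEMMAS AND PROOFS =====

theorem pvBuildTransposed_length (i : Nat) (l : List (Int × List Int)) :
    (pvBuildTransposed i l).length = l.length := by
  induction l generalizing i with
  | nil => rfl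
  | cons hd tl ih => obtain ⟨a, c⟩ := hd; simp [pvBuildTransposed, ih]


theorem pvBuildTransposed_getElem (l : List (Int × List Int)) (i k : Nat) (h : k < l.length) :
    (pvBuildTransposed i l)[k]'(by rw [pvBuildTransposed_length]; exact h) =
      (l[k].2.take (i + k) ++ [l[k].1] ++ l[k].2.drop (i + k)) := by
  induction l generalizing i k with
  | nil => simp at h
  | cons hd tl ih =>
    obtain ⟨a, c⟩ := hd
    cases k with
    | zero => simp [pvBuildTransposed]
    | succ k' =>
      have h' : k' < tl.length := by simpa using h
      have heq : i + (k' + 1) = (i + 1) + k' := by omega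
      simp only [pvBuildTransposed, List.getElem_cons_succ, heq]
      exact ih (i + 1) k' h'

theorem pv_min?_lengths {n : Nat} (ls : List Nat) (hmem : n ∈ ls) (hall : ∀ x ∈ ls, n ≤ x) :
    ls.min? = some n := by
  rw [List.min?_eq_some_iff]
  exact ⟨hmem, hall⟩

theorem fsactions_coactions_2_actions_spec : Claim_equal_fsactions_coactions_2_actions := by
  intro fs co _hdom hpre
  obtain ⟨hne, hlen, h0, hrows⟩ := hpre
  unfold Spec_fsactions_coactions_2_actions fsactions_coactions_2_actions
    fsactions_coactions_2_actions_alt pvZipStar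
  have hnpos : 0 < fs.length := List.length_pos_of_ne_nil hne
  have hzlen : (fs.zip co).length = fs.length := by simp [hlen]
  have hblen : (pvBuildTransposed 0 (fs.zip co)).length = fs.length := by
    rw [pvBuildTransposed_length, hzlen]
  have hrow : ∀ (k : Nat) (hk : k < fs.length),
      (pvBuildTransposed 0 (fs.zip co))[k]'(by omega) =
        (co[k]'(by omega)).take k ++ [fs[k]'hk] ++ (co[k]'(by omega)).drop k := by
    intro k hk
    have := pvBuildTransposed_getElem (fs.zip co) 0 k (by omega)
    simpa using this
  have hclen : ∀ (k : Nat) (hk : k < fs.length), fs.length - 1 ≤ (co[k]'(by omega)).length := by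
    intro k hk
    exact hrows _ (List.getElem_mem _)
  have hrlen : ∀ (k : Nat) (hk : k < fs.length),
      ((pvBuildTransposed 0 (fs.zip co))[k]'(by omega)).length = (co[k]'(by omega)).length + 1 := by
    intro k hk
    have hck := hclen k hk
    rw [hrow k hk]
    simp only [List.length_append, List.length_take, List.length_cons, List.length_nil,
      List.length_drop]
    omega
  have hc0 : (co[0]'(by omega)).length = fs.length - 1 := by
    have : co.getD 0 [] = co[0]'(by omega) := List.getD_eq_getElem co [] (by omega)
    rw [← this]; exact h0
  have hmin : ((pvBuildTransposed 0 (fs.zip co)).map List.length).min? = some fs.length := by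
    apply pv_min?_lengths
    · have h00 : ((pvBuildTransposed 0 (fs.zip co)).map List.length)[0]'(by simp [hblen]; omega)
          = fs.length := by
        rw [List.getElem_map, hrlen 0 hnpos, hc0]; omega
      exact h00 ▸ List.getElem_mem _
    · intro x hx
      rw [List.mem_map] at hx
      obtain ⟨r, hrmem, rfl⟩ := hx
      rw [List.mem_iff_getElem] at hrmem
      obtain ⟨k, hk, rfl⟩ := hrmem
      rw [hblen] at hk
      rw [hrlen k hk]
      have := hclen k hk
      omega
  simp only [hmin, Option.getD_some]
  apply List.map_congr_left
  intro i hi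
  rw [List.mem_range] at hi
  apply List.ext_getElem
  · simp [hblen]
  · intro j hj1 hj2
    rw [List.length_map, hblen] at hj1
    simp only [List.getElem_map, List.getElem_range]
    rw [hrow j hj1]
    have hcj := hclen j hj1
    have hcoD : co.getD j [] = co[j]'(by omega) := List.getD_eq_getElem co [] (by omega)
    have htk : ((co[j]'(by omega)).take j).length = j := by simp; omega
    by_cases hij : i = j
    · subst hij
      rw [if_pos rfl]
      rw [List.getD_eq_getElem _ _ (by simp; omega)]
      rw [List.getD_eq_getElem fs 0 hj1]
      simp [htk]
    · rw [if_neg hij]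
      by_cases hlt : i < j
      · rw [if_pos hlt, hcoD]
        rw [List.getD_eq_getElem _ _ (by simp; omega)]
        rw [List.getD_eq_getElem _ _ (by omega)]
        simp [htk, hlt]
      · rw [if_neg hlt, hcoD]
        rw [List.getD_eq_getElem _ _ (by simp; omega)]
        rw [List.getD_eq_getElem _ _ (by omega)]
        simp only [List.getElem_append, htk, List.length_append, List.length_cons,
          List.length_nil]
        rw [dif_neg (by omega)]
        rw [List.getElem_drop]
        congr 1
        omega

-- ===== VERDICT (by name: the statement is the Claim_ definition above) =====
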